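-- pv_equiv track=rewrite | github.com/fletcherist/algorithms-ds-practise | 825B.py | find_in_row
-- ===== SOURCE A (Python) =====
-- def find_in_row(row):
--   match_patterns = [
--     '.XXXX',
--     'X.XXX',
--     'XX.XX',
--     'XXX.X',
--     'XXXX.'
--   ]
--   for pattern in match_patterns:
--     if row.find(pattern) > -1:
--       return True
--   return False
-- ===== SOURCE B (Python) =====
-- def find_in_row(row):
--   for i in range(len(row) - 4):
--     w = row[i:i + 5]
--     if w.count('X') == 4 and w.count('.') == 1:
--       return True
--   return False
-- ===== Notes on version B (the rewrite author's own statement) =====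
-- stated objective: simpler
-- what changed: Replaces five separate substring searches (one per hard-coded pattern) by a single sliding window of length 5 that counts match characters and gap characters.
import Mathlib
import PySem

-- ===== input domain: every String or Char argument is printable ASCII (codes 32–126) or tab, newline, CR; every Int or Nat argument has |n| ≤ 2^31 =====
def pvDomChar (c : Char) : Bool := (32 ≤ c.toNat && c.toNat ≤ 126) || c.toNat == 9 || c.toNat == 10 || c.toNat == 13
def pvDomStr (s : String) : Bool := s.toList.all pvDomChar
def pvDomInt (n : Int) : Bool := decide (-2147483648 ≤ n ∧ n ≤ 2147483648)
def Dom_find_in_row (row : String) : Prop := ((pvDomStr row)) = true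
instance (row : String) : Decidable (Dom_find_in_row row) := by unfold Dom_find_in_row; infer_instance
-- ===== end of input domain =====

-- B replaces A's five separate substring searches by one sliding length-5 window
-- that counts 'X' and '.' characters (objective: simpler).

-- ===== PORT A =====
def find_in_row (row : String) : Bool :=
  [".XXXX", "X.XXX", "XX.XX", "XXX.X", "XXXX."].any
    (fun pattern => decide (PySem.Str.find row pattern > -1))

-- ===== PORT B =====
def find_in_row_alt (row : String) : Bool :=
  (PySem.List.pyRange 0 (PySem.Str.len row - 4) 1).any (fun i =>
    let w := PySem.Str.slice row (some i) (some (i + 5))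
    PySem.Str.count w "X" == 4 && PySem.Str.count w "." == 1)

-- ===== PRECONDITION & SPEC =====
def Spec_find_in_row (row : String) (out : Bool) : Prop := out = find_in_row_alt row
instance (row : String) (out : Bool) : Decidable (Spec_find_in_row row out) := by unfold Spec_find_in_row; infer_instance

-- ===== CLAIM (what is proved, stated in full; the proofs are below) =====
def Claim_equal_find_in_row : Prop := ∀ (row : String), Dom_find_in_row row → Spec_find_in_row row (find_in_row row)

-- ===== LEMMAS AND PROOFS =====

def pvPats : List (List Char) :=
  [['.','X','X','X','X'], ['X','.','X','X','X'], ['X','X','.','X','X'],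
   ['X','X','X','.','X'], ['X','X','X','X','.']]

def pvCheck (w : List Char) : Bool :=
  PySem.Chars.count w ['X'] == 4 && PySem.Chars.count w ['.'] == 1

theorem pvCountGo (x : Char) (fuel : Nat) : ∀ (cs : List Char) (acc : Nat), cs.length ≤ fuel →
    PySem.Chars.count.go [x] fuel cs acc = acc + cs.count x := by
  induction fuel with
  | zero =>
    intro cs acc h
    have : cs = [] := by cases cs <;> simp_all
    subst this; simp [PySem.Chars.count.go]
  | succ n ih =>
    intro cs acc h
    cases cs with
    | nil => simp [PySem.Chars.count.go]
    | cons c t =>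
      simp only [List.length_cons] at h
      by_cases hx : x = c
      · subst hx
        have hpre : ([x].isPrefixOf (x :: t)) = true := by simp [List.isPrefixOf]
        simp only [PySem.Chars.count.go, hpre, if_true, List.length_cons,
          List.length_nil, Nat.zero_add, List.drop_succ_cons, List.drop_zero]
        rw [ih t (acc + 1) (by omega)]
        simp
        omega
      · have hpre : ([x].isPrefixOf (c :: t)) = false := by simp [List.isPrefixOf, hx]
        simp only [PySem.Chars.count.go, hpre]
        rw [ih t acc (by omega)]
        have : (x == c) = false := by simp [hx]
        simp [List.count_cons]
        exact fun h' => hx h'.symm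

theorem pvCount_singleton (x : Char) (cs : List Char) :
    PySem.Chars.count cs [x] = cs.count x := by
  simp [PySem.Chars.count, pvCountGo x cs.length cs 0 (le_refl _)]

-- a 5-char window passes B's count test iff it is one of A's five patterns
theorem pvWindow5 (a b c d e : Char) :
    pvCheck [a,b,c,d,e] = true ↔ [a,b,c,d,e] ∈ pvPats := by
  simp only [pvCheck, pvCount_singleton, Bool.and_eq_true, beq_iff_eq]
  constructor
  · rintro ⟨hX, hD⟩
    by_cases ha : a = 'X' <;> by_cases hb : b = 'X' <;> by_cases hc : c = 'X' <;>
      by_cases hd : d = 'X' <;> by_cases he : e = 'X' <;>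
      simp_all [List.count_cons, pvPats]
  · intro hmem
    fin_cases hmem <;> simp

theorem pvCheck_of_mem (p : List Char) (hp : p ∈ pvPats) : pvCheck p = true := by
  fin_cases hp <;> decide

theorem pvLen_of_mem (p : List Char) (hp : p ∈ pvPats) : p.length = 5 := by
  fin_cases hp <;> decide

-- A's value characterised
theorem pvA_iff (row : String) :
    find_in_row row = true ↔ ∃ p ∈ pvPats, p <:+: row.toList := by
  simp only [find_in_row, List.any_eq_true, decide_eq_true_eq, pvPats]
  constructor
  · rintro ⟨pat, hpat, hfind⟩
    have h : 0 ≤ PySem.Str.find row pat := by omega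
    rw [PySem.Str.find_nonneg_iff] at h
    fin_cases hpat <;> exact ⟨_, by simp, h⟩
  · rintro ⟨p, hp, hinf⟩
    fin_cases hp
    · exact ⟨".XXXX", by simp, by have := (PySem.Str.find_nonneg_iff row ".XXXX").2 hinf; omega⟩
    · exact ⟨"X.XXX", by simp, by have := (PySem.Str.find_nonneg_iff row "X.XXX").2 hinf; omega⟩
    · exact ⟨"XX.XX", by simp, by have := (PySem.Str.find_nonneg_iff row "XX.XX").2 hinf; omega⟩
    · exact ⟨"XXX.X", by simp, by have := (PySem.Str.find_nonneg_iff row "XXX.X").2 hinf; omega⟩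
    · exact ⟨"XXXX.", by simp, by have := (PySem.Str.find_nonneg_iff row "XXXX.").2 hinf; omega⟩

-- B's value characterised
theorem pvB_iff (row : String) :
    find_in_row_alt row = true ↔
    ∃ k : Nat, k + 5 ≤ row.toList.length ∧ pvCheck ((row.toList.drop k).take 5) = true := by
  simp only [find_in_row_alt, List.any_eq_true, PySem.List.mem_pyRange_one]
  constructor
  · rintro ⟨i, ⟨h0, hlt⟩, hcond⟩
    refine ⟨i.toNat, ?_, ?_⟩
    · rw [PySem.Str.len_eq] at hlt; omega
    · have hi5 : (0:Int) ≤ i + 5 := by omega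
      simp only [PySem.Str.count_eq, PySem.Str.toList_slice, PySem.Chars.slice_eq_listSlice,
        PySem.List.slice_toNat row.toList h0 hi5] at hcond
      have : (i + 5).toNat - i.toNat = 5 := by omega
      rw [this] at hcond
      simpa [pvCheck] using hcond
  · rintro ⟨k, hk, hchk⟩
    refine ⟨(k : Int), ⟨by positivity, ?_⟩, ?_⟩
    · rw [PySem.Str.len_eq]; omega
    · have h0 : (0:Int) ≤ (k:Int) := by positivity
      have hi5 : (0:Int) ≤ (k:Int) + 5 := by omega
      simp only [PySem.Str.count_eq, PySem.Str.toList_slice, PySem.Chars.slice_eq_listSlice,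
        PySem.List.slice_toNat row.toList h0 hi5]
      have : ((k:Int) + 5).toNat - (k:Int).toNat = 5 := by omega
      rw [this]
      simpa [pvCheck] using hchk

-- any 5-long window at k ≤ len-5 decomposes into five chars, and conversely
theorem pvCheck_iff_mem (w : List Char) (hw : w.length = 5) :
    pvCheck w = true ↔ w ∈ pvPats := by
  match w, hw with
  | [a,b,c,d,e], _ => exact pvWindow5 a b c d e

-- ===== VERDICT (by name: the statement is the Claim_ definition above) =====
theorem find_in_row_spec : Claim_equal_find_in_row := by
  intro row _
  unfold Spec_find_in_row
  have : find_in_row row = true ↔ find_in_row_alt row = true := by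
    rw [pvA_iff, pvB_iff]
    constructor
    · rintro ⟨p, hp, s, t, h⟩
      refine ⟨s.length, ?_, ?_⟩
      · rw [← h]; have := pvLen_of_mem p hp; simp [this]
      · rw [← h, List.append_assoc, List.drop_left, List.take_left' (pvLen_of_mem p hp)]
        exact pvCheck_of_mem p hp
    · rintro ⟨k, hk, hchk⟩
      have hlen : ((row.toList.drop k).take 5).length = 5 := by
        rw [List.length_take, List.length_drop]; omega
      refine ⟨_, (pvCheck_iff_mem _ hlen).1 hchk, ?_⟩
      exact ((List.take_prefix _ _).isInfix).trans ((List.drop_suffix _ _).isInfix)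
  cases hA : find_in_row row <;> cases hB : find_in_row_alt row <;> simp_all
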